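-- pv_equiv track=rewrite | github.com/joaquim-fps/ufrj-alg-grafos | Lista 3/andar_predio.py | find_offset
-- ===== SOURCE A (Python) =====
-- def find_offset(floor):
--     total_offset   = 0
--     power_10       = 10
--     decimal_places = 1
--     forbidden_nums = {1:1}
--
--     while power_10 < floor:
--         power_10    = power_10 * 10
--         nums_with_4 = (power_10 // 10) + (9 * forbidden_nums.get(decimal_places, 0))
--
--         decimal_places                 = decimal_places + 1
--         forbidden_nums[decimal_places] = nums_with_4
--
--     for ch_digit in str(floor):
--         digit = int(ch_digit)
--
--         if digit < 4:
--             total_offset = total_offset + (digit * forbidden_nums.get(decimal_places - 1, 0))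
--         else:
--             total_offset = total_offset + ((power_10 // 10) + ((digit - 1) * forbidden_nums.get(decimal_places - 1, 0)))
--
--         decimal_places = decimal_places - 1
--         power_10       = power_10 // 10
--
--     return total_offset
-- ===== SOURCE B (Python) =====
-- def find_offset(floor):
--     # Count the labels below `floor` that were skipped (contain a digit 4) by
--     # complement: count the valid (4-free) label assignments digit by digit,
--     # working on the number itself from the least significant digit up, then
--     # subtract from `floor`.  Each position with digit d admits d choices of a
--     # smaller digit (d-1 of them 4-free when d > 4) times 9**k 4-free suffixes.
--     valid = 0
--     power9 = 1
--     n = floor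
--     while n > 0:
--         n, d = divmod(n, 10)
--         valid += (d if d < 4 else d - 1) * power9
--         power9 *= 9
--     return floor - valid
-- ===== Notes on version B (the rewrite author's own statement) =====
-- stated objective: simpler
-- what changed: B replaces A's two phases (a while loop filling a dict table keyed by digit position, then a top-down scan over str(floor) with table lookups) by complement counting: one bottom-up divmod loop over the number itself that counts 4-free label assignments with a running 9**k, subtracted from floor; no string, no table, no powers of 10. Pre_ excludes negative floors, on which A raises ValueError (int('-')).
-- intended difference: On floor an exact power of ten (10, 100, ..., 10^9 inside the domain) A's strict 'power_10 < floor' leaves its table one entry short, so A returns the skip count for floor/10 (e.g. 0 at floor=10 although label 4 was skipped) while B returns the correct count 10^p - 9^p of skipped labels below floor. — e.g. on find_offset(10): A returns 0, B returns 1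
import Mathlib
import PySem

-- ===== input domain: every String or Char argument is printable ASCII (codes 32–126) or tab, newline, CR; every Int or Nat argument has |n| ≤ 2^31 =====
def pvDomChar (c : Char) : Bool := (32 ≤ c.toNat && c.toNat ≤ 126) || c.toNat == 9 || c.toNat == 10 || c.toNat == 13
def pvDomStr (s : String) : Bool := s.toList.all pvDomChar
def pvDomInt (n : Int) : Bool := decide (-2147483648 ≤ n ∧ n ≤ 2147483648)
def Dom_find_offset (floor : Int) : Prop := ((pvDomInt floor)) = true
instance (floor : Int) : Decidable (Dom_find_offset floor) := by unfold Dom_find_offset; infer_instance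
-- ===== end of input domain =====

-- B counts the 4-free label assignments below floor bottom-up by arithmetic (no string,
-- no table) and subtracts from floor; at exact powers of ten A's short table makes A's
-- value differ (stated in D_ below); equivalence is about return values.

-- ===== PORT A =====
-- the while loop; the fuel argument only makes the recursion total (power_10 is ×10 each
-- iteration, so floor.natAbs steps are always enough); same computation otherwise
def find_offset_loopA (floor : Int) : Nat → Int → Int → PySem.Dict Int Int → Int × Int × PySem.Dict Int Int
  | 0, power_10, decimal_places, forbidden_nums => (power_10, decimal_places, forbidden_nums)
  | fuel+1, power_10, decimal_places, forbidden_nums =>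
    if power_10 < floor then
      let power_10' := power_10 * 10
      let nums_with_4 := PySem.Int.floordiv power_10' 10 + 9 * forbidden_nums.getD decimal_places 0
      find_offset_loopA floor fuel power_10' (decimal_places + 1)
        (forbidden_nums.insert (decimal_places + 1) nums_with_4)
    else (power_10, decimal_places, forbidden_nums)

-- the for loop over str(floor); int(ch_digit) is (ofStr? …).getD 0 — exact under
-- Pre_ (floor ≥ 0, so every character of str(floor) is a digit and ofStr? is some)
def find_offset_digits (forbidden_nums : PySem.Dict Int Int) :
    List Char → Int → Int → Int → Int
  | [], total_offset, _, _ => total_offset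
  | ch :: cs, total_offset, decimal_places, power_10 =>
    let digit := (PySem.Int.ofStr? (String.singleton ch)).getD 0
    let total' :=
      if digit < 4 then
        total_offset + digit * forbidden_nums.getD (decimal_places - 1) 0
      else
        total_offset + (PySem.Int.floordiv power_10 10 +
          (digit - 1) * forbidden_nums.getD (decimal_places - 1) 0)
    find_offset_digits forbidden_nums cs total' (decimal_places - 1) (PySem.Int.floordiv power_10 10)

def find_offset (floor : Int) : Int :=
  let st := find_offset_loopA floor floor.natAbs 10 1 (PySem.Dict.ofList [((1:Int), (1:Int))])
  find_offset_digits st.2.2 (PySem.Int.toChars floor) 0 st.2.1 st.1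

-- ===== PORT B =====
-- Source B's while loop, bottom-up over the number by divmod; the fuel argument only makes
-- the recursion total (n shrinks by //10 each iteration, so floor.natAbs steps suffice)
def find_offset_alt_loop : Nat → Int → Int → Int → Int
  | 0, _, valid, _ => valid
  | fuel+1, n, valid, power9 =>
    if 0 < n then
      let d := PySem.Int.mod n 10
      find_offset_alt_loop fuel (PySem.Int.floordiv n 10)
        (valid + (if d < 4 then d else d - 1) * power9) (power9 * 9)
    else valid

def find_offset_alt (floor : Int) : Int :=
  floor - find_offset_alt_loop floor.natAbs floor 0 1

-- ===== PRECONDITION & SPEC =====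
-- Pre_ excludes exactly the negative floors: there str(floor) starts with '-' and
-- A's int(ch_digit) raises ValueError
def Pre_find_offset (floor : Int) : Prop := 0 ≤ floor
instance (floor : Int) : Decidable (Pre_find_offset floor) := by unfold Pre_find_offset; infer_instance
def pvWitness_find_offset : Int := (42)

-- On floor an exact power of ten (10 … 10^9 inside the domain) A's strict
-- 'power_10 < floor' leaves its table one entry short, so A returns the skip count for
-- floor/10 (e.g. 0 at floor=10 although label 4 was skipped) while B returns the correct
-- count 10^p - 9^p of skipped labels below floor.
def D_find_offset (floor : Int) : Prop :=
  floor ∈ ([10, 100, 1000, 10000, 100000, 1000000, 10000000, 100000000, 1000000000] : List Int)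
instance (floor : Int) : Decidable (D_find_offset floor) := by unfold D_find_offset; infer_instance

def Spec_find_offset (floor : Int) (out : Int) : Prop := ¬ D_find_offset floor → out = find_offset_alt floor
instance (floor : Int) (out : Int) : Decidable (Spec_find_offset floor out) := by unfold Spec_find_offset; infer_instance

def pvDiffWitness_find_offset : Int := (10)
def pvDiffWitnessOut_find_offset : Int × Int := (0, 1)

-- ===== CLAIM (what is proved, stated in full; the proofs are below) =====
def Claim_unchanged_find_offset : Prop := ∀ (floor : Int), Dom_find_offset floor → Pre_find_offset floor → Spec_find_offset floor (find_offset floor)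
def Claim_changed_find_offset : Prop := Dom_find_offset (pvDiffWitness_find_offset) ∧ Pre_find_offset (pvDiffWitness_find_offset) ∧ D_find_offset (pvDiffWitness_find_offset) ∧ find_offset (pvDiffWitness_find_offset) = pvDiffWitnessOut_find_offset.1 ∧ find_offset_alt (pvDiffWitness_find_offset) = pvDiffWitnessOut_find_offset.2 ∧ pvDiffWitnessOut_find_offset.1 ≠ pvDiffWitnessOut_find_offset.2
def Claim_exact_find_offset : Prop := ∀ (floor : Int), Dom_find_offset floor → Pre_find_offset floor → D_find_offset floor → find_offset floor ≠ find_offset_alt floor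

-- ===== LEMMAS AND PROOFS =====

-- closed form of A's table values: forbidden_nums[x] = 10^x - 9^x
def pvG (x : Int) : Int := (10:Int) ^ x.toNat - (9:Int) ^ x.toNat

-- A's table after j iterations of the while loop (keys 1 .. j+1)
def pvTbl : Nat → PySem.Dict Int Int
  | 0 => PySem.Dict.ofList [((1:Int), (1:Int))]
  | j+1 => (pvTbl j).insert ((j:Int)+2) (pvG ((j:Int)+2))

lemma pvTbl_getD (j : Nat) (x : Int) :
    (pvTbl j).getD x 0 = if 1 ≤ x ∧ x ≤ (j:Int)+1 then pvG x else 0 := by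
  induction j with
  | zero =>
    show (PySem.Dict.empty.insert 1 1).getD x 0 = _
    rw [PySem.Dict.getD_insert]
    split_ifs with h1 h2 h2
    · subst h1; decide
    · omega
    · omega
    · exact PySem.Dict.getD_empty x 0
  | succ j ih =>
    show ((pvTbl j).insert ((j:Int)+2) (pvG ((j:Int)+2))).getD x 0 = _
    rw [PySem.Dict.getD_insert, ih]
    push_cast
    split_ifs with h1 h2 h2 <;> first | rfl | omega | (subst h1; rfl)

-- A's power_10 as a function of decimal_places (0 once decimal_places goes negative)
def pvPw (dp : Int) : Int := if 0 ≤ dp then (10:Int) ^ dp.toNat else 0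

lemma pvPw_div (dp : Int) : PySem.Int.floordiv (pvPw dp) 10 = pvPw (dp - 1) := by
  unfold pvPw
  rw [PySem.Int.floordiv_eq_ediv_of_pos (by norm_num)]
  split_ifs with h1 h2 h2
  · have : dp.toNat = (dp - 1).toNat + 1 := by omega
    rw [this, pow_succ, Int.mul_ediv_cancel _ (by norm_num)]
  · have : dp = 0 := by omega
    subst this; decide
  · omega
  · decide

-- the digit value of a character, and A's per-digit "skipped" valuation over str(floor):
-- a high-to-low scan with the closed-form table values (proof-side restatement of A's loop)
def pvDval (c : Char) : Int := (PySem.Int.ofStr? (String.singleton c)).getD 0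

def pvScan : List Char → Int → Int → Int
  | [], total, _ => total
  | ch :: cs, total, k =>
    let d := pvDval ch
    let g := if 1 ≤ k then (10:Int) ^ k.toNat - (9:Int) ^ k.toNat else 0
    let total' :=
      if d < 4 then total + d * g
      else total + ((if 0 ≤ k then (10:Int) ^ k.toNat else 0) + (d - 1) * g)
    pvScan cs total' (k - 1)

-- A's digit loop over the table equals the closed-form scan
lemma pv_digits_eq (cs : List Char) : ∀ (total dp : Int) (m : Nat), dp ≤ (m:Int)+1 →
    find_offset_digits (pvTbl m) cs total dp (pvPw dp) =
      pvScan cs total (dp - 1) := by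
  induction cs with
  | nil => intro total dp m _; rfl
  | cons ch cs ih =>
    intro total dp m hdp
    show find_offset_digits (pvTbl m) cs _ (dp - 1) (PySem.Int.floordiv (pvPw dp) 10) =
      pvScan cs _ (dp - 1 - 1)
    rw [pvPw_div]
    have htbl : (pvTbl m).getD (dp - 1) 0 =
        (if 1 ≤ dp - 1 then (10:Int) ^ (dp-1).toNat - (9:Int) ^ (dp-1).toNat else 0) := by
      rw [pvTbl_getD]
      unfold pvG
      split_ifs with h1 h2 h2 <;> first | rfl | omega
    have hpw : pvPw (dp - 1) = (if 0 ≤ dp - 1 then (10:Int) ^ (dp-1).toNat else 0) := rfl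
    rw [htbl, hpw]
    exact ih _ (dp - 1) m (by omega)

-- characterisation of the while loop for floor ≥ 11
lemma pv_loopA_spec (n : Int) (hn : 11 ≤ n) :
    ∀ (fuel j : Nat), (10:Int) ^ j < n → n ≤ (10:Int) ^ (j + 1 + fuel) →
    find_offset_loopA n fuel ((10:Int) ^ (j+1)) ((j:Int)+1) (pvTbl j) =
      ((10:Int) ^ (Nat.log 10 (n-1).toNat + 1),
       ((Nat.log 10 (n-1).toNat : Int) + 1),
       pvTbl (Nat.log 10 (n-1).toNat)) := by
  set L : Nat := Nat.log 10 (n-1).toNat with hL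
  have hx0 : (n-1).toNat ≠ 0 := by omega
  have ht : (((n-1).toNat : Int)) = n - 1 := Int.toNat_of_nonneg (by omega)
  have hlo : (10:Int) ^ L < n := by
    have h := Nat.pow_log_le_self 10 hx0
    have hc : (((10:Nat) ^ L : Nat) : Int) ≤ (((n-1).toNat : Nat) : Int) := by exact_mod_cast h
    push_cast at hc
    omega
  have hhi : n ≤ (10:Int) ^ (L+1) := by
    have h := Nat.lt_pow_succ_log_self (by norm_num : 1 < 10) (n-1).toNat
    have hc : (((n-1).toNat : Nat) : Int) < (((10:Nat) ^ (L+1) : Nat) : Int) := by exact_mod_cast h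
    push_cast at hc
    omega
  have huniq : ∀ j : Nat, (10:Int) ^ j < n → n ≤ (10:Int) ^ (j+1) → j = L := by
    intro j hj hle
    by_contra hne
    rcases Nat.lt_or_ge j L with h | h
    · have : (10:Int) ^ (j+1) ≤ (10:Int) ^ L :=
        pow_le_pow_right₀ (by norm_num) (by omega)
      omega
    · have : (10:Int) ^ (L+1) ≤ (10:Int) ^ j :=
        pow_le_pow_right₀ (by norm_num) (by omega)
      omega
  intro fuel
  induction fuel with
  | zero =>
    intro j hj hle
    have hjL : j = L := huniq j hj (by simpa using hle)
    subst hjL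
    rfl
  | succ fuel ihf =>
    intro j hj hle
    unfold find_offset_loopA
    by_cases hc : (10:Int) ^ (j+1) < n
    · rw [if_pos hc]
      have e1 : (10:Int) ^ (j+1) * 10 = (10:Int) ^ (j+2) := by ring
      have e2 : PySem.Int.floordiv ((10:Int) ^ (j+2)) 10 = (10:Int) ^ (j+1) := by
        rw [show ((10:Int) ^ (j+2)) = (10:Int) ^ (j+1) * 10 by ring,
          PySem.Int.floordiv_eq_ediv_of_pos (by norm_num),
          Int.mul_ediv_cancel _ (by norm_num)]
      have e3 : (pvTbl j).getD ((j:Int)+1) 0 = pvG ((j:Int)+1) := by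
        rw [pvTbl_getD]; rw [if_pos (by constructor <;> omega)]
      have e4 : (10:Int) ^ (j+1) + 9 * pvG ((j:Int)+1) = pvG ((j:Int)+2) := by
        unfold pvG
        have h1 : ((j:Int)+1).toNat = j + 1 := by omega
        have h2 : ((j:Int)+2).toNat = j + 2 := by omega
        rw [h1, h2]; ring
      have e5 : ((j:Int) + 1 + 1) = ((j:Int) + 2) := by ring
      simp only [e1, e2, e3, e4, e5]
      have etbl : ((pvTbl j).insert ((j:Int)+2) (pvG ((j:Int)+2))) = pvTbl (j+1) := rfl
      rw [etbl]
      have hcast : ((j:Int) + 2) = (((j+1 : Nat) : Nat) : Int) + 1 := by push_cast; ring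
      rw [hcast]
      exact ihf (j+1) hc (by
        have : j + 1 + 1 + fuel = j + 1 + (fuel + 1) := by omega
        rw [this]; exact hle)
    · rw [if_neg hc]
      have hjL : j = L := huniq j hj (by omega)
      subst hjL
      rfl

-- the loop does nothing when power_10 < floor fails (the floor ≤ 10 case)
lemma pv_loopA_stop (n : Int) (fuel : Nat) (p dp : Int) (f : PySem.Dict Int Int)
    (h : ¬ p < n) : find_offset_loopA n fuel p dp f = (p, dp, f) := by
  cases fuel with
  | zero => rfl
  | succ fuel => unfold find_offset_loopA; rw [if_neg h]

-- exact length of str(a) for a : Nat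
lemma pv_toDigitsCore_len : ∀ (f a : Nat) (l : List Char), 0 < f → a < 10 ^ f →
    (Nat.toDigitsCore 10 f a l).length = Nat.log 10 a + 1 + l.length := by
  intro f
  induction f with
  | zero => intro a l h; omega
  | succ f ih =>
    intro a l _ hlt
    show (if a / 10 = 0 then (a % 10).digitChar :: l
      else Nat.toDigitsCore 10 f (a / 10) ((a % 10).digitChar :: l)).length = _
    by_cases hz : a / 10 = 0
    · rw [if_pos hz]
      have ha : a < 10 := by omega
      have : Nat.log 10 a = 0 := by
        rw [Nat.log_eq_zero_iff]; left; exact ha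
      simp [this]
      omega
    · rw [if_neg hz]
      have ha : 10 ≤ a := by
        by_contra h; exact hz (Nat.div_eq_of_lt (by omega))
      have hf : 0 < f := by
        by_contra h
        have : f = 0 := by omega
        subst this; omega
      have hdiv : a / 10 < 10 ^ f := by
        rw [Nat.div_lt_iff_lt_mul (by norm_num)]
        calc a < 10 ^ (f+1) := hlt
        _ = 10 ^ f * 10 := by ring
      rw [ih (a/10) _ hf hdiv, Nat.log_div_base]
      have hpos : 0 < Nat.log 10 a := Nat.log_pos (by norm_num) ha
      simp only [List.length_cons]
      omega

lemma pv_toDigits_len (a : Nat) : (Nat.toDigits 10 a).length = Nat.log 10 a + 1 := by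
  have h := pv_toDigitsCore_len (a+1) a [] (by omega)
    (lt_of_lt_of_le (Nat.lt_pow_self (by norm_num))
      (Nat.pow_le_pow_right (by norm_num) (by omega)))
  simpa [Nat.toDigits] using h

-- ---- structure of Nat.toDigits: last digit splits off ----

lemma pv_core_shift : ∀ (f a : Nat) (l : List Char),
    Nat.toDigitsCore 10 f a l = Nat.toDigitsCore 10 f a [] ++ l := by
  intro f
  induction f with
  | zero => intro a l; rfl
  | succ f ih =>
    intro a l
    show (if a / 10 = 0 then (a % 10).digitChar :: l
        else Nat.toDigitsCore 10 f (a / 10) ((a % 10).digitChar :: l)) =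
      (if a / 10 = 0 then (a % 10).digitChar :: ([] : List Char)
        else Nat.toDigitsCore 10 f (a / 10) ((a % 10).digitChar :: [])) ++ l
    by_cases hz : a / 10 = 0
    · rw [if_pos hz, if_pos hz]; rfl
    · rw [if_neg hz, if_neg hz, ih (a/10) ((a % 10).digitChar :: l),
        ih (a/10) ((a % 10).digitChar :: [])]
      simp

lemma pv_core_fuel : ∀ (a f f' : Nat), 0 < f → 0 < f' → a < 10 ^ f → a < 10 ^ f' →
    Nat.toDigitsCore 10 f a [] = Nat.toDigitsCore 10 f' a [] := by
  intro a
  induction a using Nat.strong_induction_on with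
  | _ a ih =>
    intro f f' hf hf' hb hb'
    obtain ⟨g, rfl⟩ : ∃ g, f = g + 1 := ⟨f - 1, by omega⟩
    obtain ⟨g', rfl⟩ : ∃ g', f' = g' + 1 := ⟨f' - 1, by omega⟩
    show (if a / 10 = 0 then (a % 10).digitChar :: ([] : List Char)
        else Nat.toDigitsCore 10 g (a / 10) ((a % 10).digitChar :: [])) =
      (if a / 10 = 0 then (a % 10).digitChar :: ([] : List Char)
        else Nat.toDigitsCore 10 g' (a / 10) ((a % 10).digitChar :: []))
    by_cases hz : a / 10 = 0
    · rw [if_pos hz, if_pos hz]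
    · rw [if_neg hz, if_neg hz,
        pv_core_shift g (a/10) ((a % 10).digitChar :: []),
        pv_core_shift g' (a/10) ((a % 10).digitChar :: [])]
      have ha : 10 ≤ a := by
        by_contra h; exact hz (Nat.div_eq_of_lt (by omega))
      have hg : 0 < g := by
        by_contra h
        have : g = 0 := by omega
        subst this
        omega
      have hg' : 0 < g' := by
        by_contra h
        have : g' = 0 := by omega
        subst this
        omega
      have hd : a / 10 < 10 ^ g := by
        rw [Nat.div_lt_iff_lt_mul (by norm_num)]
        calc a < 10 ^ (g+1) := hb
        _ = 10 ^ g * 10 := by ring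
      have hd' : a / 10 < 10 ^ g' := by
        rw [Nat.div_lt_iff_lt_mul (by norm_num)]
        calc a < 10 ^ (g'+1) := hb'
        _ = 10 ^ g' * 10 := by ring
      rw [ih (a/10) (by omega) g g' hg hg' hd hd']

lemma pv_toDigits_small (a : Nat) (h : a < 10) : Nat.toDigits 10 a = [a.digitChar] := by
  show (if a / 10 = 0 then (a % 10).digitChar :: ([] : List Char)
      else Nat.toDigitsCore 10 a (a / 10) ((a % 10).digitChar :: [])) = [a.digitChar]
  rw [if_pos (Nat.div_eq_of_lt h), Nat.mod_eq_of_lt h]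

lemma pv_toDigits_step (a : Nat) (h : 10 ≤ a) :
    Nat.toDigits 10 a = Nat.toDigits 10 (a/10) ++ [(a % 10).digitChar] := by
  have hz : a / 10 ≠ 0 := by
    intro hc
    have := Nat.div_eq_of_lt (a := a) (b := 10)
    omega
  show (if a / 10 = 0 then (a % 10).digitChar :: ([] : List Char)
      else Nat.toDigitsCore 10 a (a / 10) ((a % 10).digitChar :: [])) = _
  rw [if_neg hz, pv_core_shift a (a/10) ((a % 10).digitChar :: [])]
  have hfuel : Nat.toDigitsCore 10 a (a/10) [] = Nat.toDigitsCore 10 (a/10+1) (a/10) [] := by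
    apply pv_core_fuel (a/10) a (a/10+1) (by omega) (by omega)
    · calc a / 10 ≤ a := Nat.div_le_self a 10
      _ < 10 ^ a := Nat.lt_pow_self (by norm_num)
    · calc a / 10 < 10 ^ (a/10) := Nat.lt_pow_self (by norm_num)
      _ ≤ 10 ^ (a/10+1) := Nat.pow_le_pow_right (by norm_num) (by omega)
  rw [hfuel]
  rfl

-- ---- the two base-10 valuations of a digit string ----

def pvCval (d : Int) : Int := if d < 4 then d else d - 1

def pvV10 (ds : List Char) : Int := ds.foldl (fun a c => 10 * a + pvDval c) 0
def pvV9 (ds : List Char) : Int := ds.foldl (fun a c => 9 * a + pvCval (pvDval c)) 0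

lemma pv_foldl_shift (m : Int) (f : Char → Int) : ∀ (ds : List Char) (a : Int),
    ds.foldl (fun x c => m * x + f c) a = a * m ^ ds.length + ds.foldl (fun x c => m * x + f c) 0 := by
  intro ds
  induction ds with
  | nil => intro a; simp
  | cons c cs ih =>
    intro a
    simp only [List.foldl_cons, List.length_cons]
    rw [ih (m * a + f c), ih (m * 0 + f c)]
    ring

-- A's scan started at the top digit position is the difference of the two valuations
lemma pv_scan_eq : ∀ (ds : List Char) (t : Int) (k : Nat), ds.length = k + 1 →
    pvScan ds t (k : Int) = t + pvV10 ds - pvV9 ds := by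
  intro ds
  induction ds with
  | nil => intro t k h; simp at h
  | cons ch cs ih =>
    intro t k hlen
    cases k with
    | zero =>
      have hcs : cs = [] := by
        have : cs.length = 0 := by simpa using hlen
        simpa using this
      subst hcs
      simp only [pvScan, pvV10, pvV9, List.foldl_cons, List.foldl_nil]
      unfold pvCval
      simp only [Nat.cast_zero, Int.toNat_zero, pow_zero]
      split_ifs <;> omega
    | succ k' =>
      have hcs : cs.length = k' + 1 := by simpa using hlen
      show pvScan cs _ ((((k':Nat)+1 : Nat) : Int) - 1) = _
      have hcast : (((k'+1 : Nat) : Int)) - 1 = (k' : Int) := by push_cast; ring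
      rw [hcast, ih _ k' hcs]
      have hg : (if (1:Int) ≤ ((k'+1 : Nat) : Int) then
          (10:Int) ^ (((k'+1 : Nat) : Int)).toNat - (9:Int) ^ (((k'+1 : Nat) : Int)).toNat else 0) =
          (10:Int) ^ (k'+1) - (9:Int) ^ (k'+1) := by
        rw [if_pos (by push_cast; omega)]
        norm_num
      have hp : (if (0:Int) ≤ ((k'+1 : Nat) : Int) then (10:Int) ^ (((k'+1 : Nat) : Int)).toNat else 0) =
          (10:Int) ^ (k'+1) := by
        rw [if_pos (by push_cast; omega)]
        norm_num
      simp only [hg, hp]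
      have h10 : pvV10 (ch :: cs) = pvDval ch * (10:Int) ^ (k'+1) + pvV10 cs := by
        simp only [pvV10, List.foldl_cons]
        rw [pv_foldl_shift 10 pvDval cs (10 * 0 + pvDval ch), hcs]
        ring
      have h9 : pvV9 (ch :: cs) = pvCval (pvDval ch) * (9:Int) ^ (k'+1) + pvV9 cs := by
        simp only [pvV9, List.foldl_cons]
        rw [pv_foldl_shift 9 (fun c => pvCval (pvDval c)) cs (9 * 0 + pvCval (pvDval ch)), hcs]
        ring
      rw [h10, h9]
      unfold pvCval
      split_ifs <;> ring

-- digit characters evaluate back to their digit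
lemma pv_dval_digitChar (r : Nat) (h : r < 10) : pvDval (Nat.digitChar r) = (r : Int) := by
  interval_cases r <;> decide

-- the two valuations of str(n)
lemma pv_v10_toDigits : ∀ n : Nat, pvV10 (Nat.toDigits 10 n) = (n : Int) := by
  intro n
  induction n using Nat.strong_induction_on with
  | _ n ih =>
    by_cases h : n < 10
    · rw [pv_toDigits_small n h]
      simp [pvV10, pv_dval_digitChar n h]
    · rw [pv_toDigits_step n (by omega)]
      simp only [pvV10, List.foldl_append, List.foldl_cons, List.foldl_nil]
      have := ih (n/10) (Nat.div_lt_self (by omega) (by omega))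
      simp only [pvV10] at this
      rw [this, pv_dval_digitChar (n % 10) (Nat.mod_lt n (by omega))]
      omega

-- the complement count as a recursion on the number (what B's loop computes)
def pvNZ (n : Nat) : Int :=
  if n < 10 then pvCval n
  else 9 * pvNZ (n / 10) + pvCval ((n % 10 : Nat) : Int)
decreasing_by exact Nat.div_lt_self (by omega) (by omega)

lemma pvNZ_step (m : Nat) : pvNZ m = 9 * pvNZ (m / 10) + pvCval ((m % 10 : Nat) : Int) := by
  by_cases h : m < 10
  · have h10 : m / 10 = 0 := Nat.div_eq_of_lt h
    have hm : m % 10 = m := Nat.mod_eq_of_lt h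
    rw [pvNZ, if_pos h, h10, hm]
    have h0 : pvNZ 0 = 0 := by rw [pvNZ]; norm_num [pvCval]
    rw [h0]
    ring
  · conv_lhs => rw [pvNZ]
    rw [if_neg h]

lemma pv_v9_toDigits : ∀ n : Nat, pvV9 (Nat.toDigits 10 n) = pvNZ n := by
  intro n
  induction n using Nat.strong_induction_on with
  | _ n ih =>
    by_cases h : n < 10
    · rw [pv_toDigits_small n h]
      simp only [pvV9, List.foldl_cons, List.foldl_nil]
      rw [pv_dval_digitChar n h, pvNZ, if_pos h]
      ring
    · rw [pv_toDigits_step n (by omega)]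
      simp only [pvV9, List.foldl_append, List.foldl_cons, List.foldl_nil]
      have := ih (n/10) (Nat.div_lt_self (by omega) (by omega))
      simp only [pvV9] at this
      rw [this, pv_dval_digitChar (n % 10) (Nat.mod_lt n (by omega)), pvNZ_step n]

-- B's loop computes valid + p9 * pvNZ n (fuel ≥ n suffices: n shrinks by //10 each step)
lemma pv_alt_loop : ∀ (fuel m : Nat) (t p : Int), m ≤ fuel →
    find_offset_alt_loop fuel (m : Int) t p = t + p * pvNZ m := by
  intro fuel
  induction fuel with
  | zero =>
    intro m t p hm
    have : m = 0 := by omega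
    subst this
    have h0 : pvNZ 0 = 0 := by rw [pvNZ]; norm_num [pvCval]
    simp [find_offset_alt_loop, h0]
  | succ fuel ih =>
    intro m t p hm
    show (if (0:Int) < (m:Int) then _ else _) = _
    by_cases hz : 0 < m
    · rw [if_pos (by exact_mod_cast hz)]
      have hmod : PySem.Int.mod (m : Int) 10 = ((m % 10 : Nat) : Int) := by
        exact_mod_cast PySem.Int.mod_natCast m 10
      have hdiv : PySem.Int.floordiv (m : Int) 10 = ((m / 10 : Nat) : Int) := by
        exact_mod_cast PySem.Int.floordiv_natCast m 10
      simp only [hmod, hdiv]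
      rw [ih (m/10) _ _ (by
        have := Nat.div_lt_self hz (by omega : 1 < 10)
        omega)]
      rw [pvNZ_step m]
      unfold pvCval
      split_ifs <;> ring
    · rw [if_neg (by exact_mod_cast hz)]
      have : m = 0 := by omega
      subst this
      have h0 : pvNZ 0 = 0 := by rw [pvNZ]; norm_num [pvCval]
      rw [h0]
      ring

-- log10 is unchanged by subtracting 1 except at exact powers of ten
lemma pv_log_pred (m : Nat) (h11 : 11 ≤ m) (hdm : m ≤ 2^31)
    (hnp : ∀ p : Nat, 1 ≤ p → p ≤ 9 → m ≠ 10 ^ p) :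
    Nat.log 10 (m - 1) = Nat.log 10 m := by
  set L := Nat.log 10 m with hLdef
  have h1 : 10 ^ L ≤ m := Nat.pow_log_le_self 10 (by omega)
  have h2 : m < 10 ^ (L + 1) := Nat.lt_pow_succ_log_self (by norm_num) m
  have hL1 : 1 ≤ L := by
    have : 0 < L := Nat.log_pos (by norm_num) (by omega)
    omega
  have hL9 : L ≤ 9 := by
    have hlt : m < 10 ^ 10 := by omega
    have := Nat.log_lt_of_lt_pow (by omega : m ≠ 0) hlt
    omega
  have hne : m ≠ 10 ^ L := hnp L hL1 hL9
  exact Nat.log_eq_of_pow_le_of_lt_pow (by omega) (by omega)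

-- shared shape of both sides: the result is m - pvNZ m
lemma pv_A_eq (m : Nat) (hdm : m ≤ 2^31)
    (hnp : ∀ p : Nat, 1 ≤ p → p ≤ 9 → m ≠ 10 ^ p) :
    find_offset (m : Int) = (m : Int) - pvNZ m := by
  unfold find_offset
  have htoC : PySem.Int.toChars (m : Int) = Nat.toDigits 10 m := by
    unfold PySem.Int.toChars
    rw [if_neg (by omega)]
    simp
  by_cases h10 : m ≤ 10
  · have hm9 : m < 10 := by
      rcases Nat.lt_or_ge m 10 with h | h
      · exact h
      · exfalso
        exact hnp 1 (by omega) (by omega) (by omega)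
    rw [pv_loopA_stop (m : Int) (m : Int).natAbs 10 1 _ (by
      simp only [not_lt]
      exact_mod_cast Nat.le_of_lt_succ (by omega))]
    have hinit : PySem.Dict.ofList [((1:Int), (1:Int))] = pvTbl 0 := rfl
    rw [hinit, htoC]
    have hd := pv_digits_eq (Nat.toDigits 10 m) 0 1 0 (by norm_num)
    rw [show pvPw 1 = (10:Int) from by decide] at hd
    rw [hd]
    have hs := pv_scan_eq (Nat.toDigits 10 m) 0 0 (by rw [pv_toDigits_small m hm9]; rfl)
    push_cast at hs
    norm_num at hs ⊢
    rw [hs, pv_v10_toDigits, pv_v9_toDigits]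
  · have hm11 : 11 ≤ m := by
      rcases Nat.lt_or_ge m 11 with h | h
      · omega
      · exact h
    have hn : (11:Int) ≤ (m : Int) := by exact_mod_cast hm11
    have hfuel : (m : Int) ≤ (10:Int) ^ (0 + 1 + (m : Int).natAbs) := by
      have h1 : ((m : Int).natAbs : Int) < (10:Int) ^ (m : Int).natAbs := by
        exact_mod_cast Nat.lt_pow_self (by norm_num : (1:Nat) < 10)
      have h2 : (10:Int) ^ (m : Int).natAbs ≤ (10:Int) ^ (0 + 1 + (m : Int).natAbs) :=
        pow_le_pow_right₀ (by norm_num) (by omega)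
      have h3 : (m : Int).natAbs = m := by simp
      omega
    have hloop := pv_loopA_spec (m : Int) hn (m : Int).natAbs 0 (by simpa using lt_of_lt_of_le (by norm_num : (10:Int)^0 < 11) hn) hfuel
    have hinit : PySem.Dict.ofList [((1:Int), (1:Int))] = pvTbl 0 := rfl
    rw [hinit]
    have hc : find_offset_loopA (m : Int) (m : Int).natAbs 10 1 (pvTbl 0) =
        find_offset_loopA (m : Int) (m : Int).natAbs ((10:Int) ^ (0+1)) (((0:Nat):Int)+1) (pvTbl 0) := by
      norm_num
    rw [hc, hloop]
    have hpred : ((m : Int) - 1).toNat = m - 1 := by omega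
    rw [hpred]
    have hlog := pv_log_pred m hm11 hdm hnp
    set L : Nat := Nat.log 10 m with hLdef
    rw [hlog]
    have hdig := pv_digits_eq (PySem.Int.toChars (m : Int)) 0 ((L:Int)+1) L (by omega)
    have hpw : pvPw ((L:Int)+1) = (10:Int) ^ (L+1) := by
      unfold pvPw
      rw [if_pos (by omega)]
      have h : ((L:Int)+1).toNat = L + 1 := by omega
      rw [h]
    rw [hpw] at hdig
    simp only [hdig]
    have hcast : ((L:Int) + 1 - 1) = (L : Int) := by ring
    rw [hcast, htoC, pv_scan_eq _ 0 L (by rw [pv_toDigits_len m]),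
      pv_v10_toDigits, pv_v9_toDigits]
    ring

lemma pv_B_eq (m : Nat) : find_offset_alt (m : Int) = (m : Int) - pvNZ m := by
  unfold find_offset_alt
  have habs : ((m : Int)).natAbs = m := by simp
  rw [habs, pv_alt_loop m m 0 1 (le_refl m)]
  ring

-- ===== VERDICT (by name: the statements are the Claim_ definitions above) =====
theorem find_offset_spec : Claim_unchanged_find_offset := by
  intro n hdom hpre
  unfold Spec_find_offset
  intro hD
  obtain ⟨m, rfl⟩ : ∃ m : Nat, n = (m : Int) := ⟨n.toNat, (Int.toNat_of_nonneg hpre).symm⟩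
  have hdm : m ≤ 2^31 := by
    unfold Dom_find_offset pvDomInt at hdom
    simp only [decide_eq_true_eq] at hdom
    omega
  have hnp : ∀ p : Nat, 1 ≤ p → p ≤ 9 → m ≠ 10 ^ p := by
    intro p hp1 hp9 heq
    apply hD
    unfold D_find_offset
    subst heq
    interval_cases p <;> norm_num
  rw [pv_A_eq m hdm hnp, pv_B_eq m]

theorem find_offset_changed : Claim_changed_find_offset := by
  unfold Claim_changed_find_offset
  refine ⟨by decide, by decide, by decide, by decide, by decide, by decide⟩

theorem find_offset_tight : Claim_exact_find_offset := by
  intro n hdom hpre hD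
  unfold D_find_offset at hD
  simp only [List.mem_cons, List.not_mem_nil, or_false] at hD
  rcases hD with rfl | rfl | rfl | rfl | rfl | rfl | rfl | rfl | rfl <;> decide
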